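-- pv_equiv track=rewrite | github.com/Saumyasingh-byte/TWoc_ | problem-15.py | arrayLeftRight
-- ===== SOURCE A (Python) =====
-- def arrayLeftRight(array):
--     size = len(array)
--     if array[0] <= min(array[1:]):
--         return array[0]
--     for i in range(1,size - 1):
--         if max(array[:i]) <= array[i] <= min(array[i+1:]):
--             return array[i]
--     if max(array[:-1]) <= array[-1]:
--         return array[-1]
-- ===== SOURCE B (Python) =====
-- def arrayLeftRight(array):
--     n = len(array)
--     # suf[i] = min(array[i:]), built in one right-to-left pass
--     suf = [0] * n
--     m = array[-1]
--     for i in range(n - 1, -1, -1):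
--         m = m if m < array[i] else array[i]
--         suf[i] = m
--     pm = None  # max of array[:i], None while the prefix is empty
--     for i in range(n):
--         x = array[i]
--         if (pm is None or pm <= x) and (i == n - 1 or x <= suf[i + 1]):
--             return x
--         if pm is None or x > pm:
--             pm = x
--     return None
-- ===== Notes on version B (the rewrite author's own statement) =====
-- stated objective: faster
-- what changed: Replaced the quadratic scan that recomputes max(array[:i]) and min(array[i+1:]) at every index by one right-to-left pass building suffix minima plus one left-to-right pass carrying a running prefix maximum.
-- crash fix: On single-element lists A raises ValueError (min of the empty slice array[1:]); B returns that element, the natural answer. — e.g. on arrayLeftRight([5]): A raises ValueError, B returns some 5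
import Mathlib
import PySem

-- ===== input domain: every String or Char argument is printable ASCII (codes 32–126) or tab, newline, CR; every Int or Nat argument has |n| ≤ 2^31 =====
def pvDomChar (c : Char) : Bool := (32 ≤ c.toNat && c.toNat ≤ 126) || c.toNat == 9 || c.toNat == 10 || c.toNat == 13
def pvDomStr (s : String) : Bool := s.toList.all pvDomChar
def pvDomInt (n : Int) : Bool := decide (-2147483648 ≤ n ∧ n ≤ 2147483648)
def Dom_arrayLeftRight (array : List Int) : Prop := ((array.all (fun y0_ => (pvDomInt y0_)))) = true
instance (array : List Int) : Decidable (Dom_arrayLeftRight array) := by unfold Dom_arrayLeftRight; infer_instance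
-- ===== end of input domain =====

-- B replaces A's quadratic rescans of max(array[:i]) / min(array[i+1:]) by a suffix-minima
-- pass plus a running prefix maximum (one left-to-right scan): asymptotically faster.

-- ===== PORT A =====
-- the trailing 'if max(array[:-1]) <= array[-1]: return array[-1]' (reached when the loop finds nothing)
def aFinal (array : List Int) : Option Int :=
  match PySem.List.max? (PySem.List.slice array none (some (-1))) (fun y => y),
        PySem.List.pyGet? array (-1) with
  | some M, some last => if M ≤ last then some last else none
  | _, _ => none

-- the 'for i in range(1, size-1)' loop; 'none' in the catch-all = the IndexError/ValueError Python
-- would raise there (unreachable for the in-range indices the loop feeds it)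
def aLoop (array : List Int) : List Int → Option Int
  | [] => none
  | i :: is =>
    match PySem.List.max? (PySem.List.slice array none (some i)) (fun y => y),
          PySem.List.pyGet? array i,
          PySem.List.min? (PySem.List.slice array (some (i + 1)) none) (fun y => y) with
    | some M, some x, some m => if M ≤ x ∧ x ≤ m then some x else aLoop array is
    | _, _, _ => none

def arrayLeftRight (array : List Int) : Option Int :=
  let size : Int := (array.length : Int)
  match PySem.List.pyGet? array 0,
        PySem.List.min? (PySem.List.slice array (some 1) none) (fun y => y) with
  | some a0, some m1 =>
    if a0 ≤ m1 then some a0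
    else
      match aLoop array (PySem.List.pyRange 1 (size - 1) 1) with
      | some v => some v
      | none => aFinal array
  | _, _ => none

-- ===== PORT B =====
-- sufMins xs = Source B's suf array: (sufMins xs)[i] = min(xs[i:]), built right to left
def sufMins : List Int → List Int
  | [] => []
  | x :: xs =>
    match sufMins xs with
    | [] => [x]
    | m :: ms => (if m < x then m else x) :: m :: ms

-- Source B's forward scan: pm = running max of the prefix (none while empty), suf = suffix minima
-- of the elements strictly right of the current one
def bScan : Option Int → List Int → List Int → Option Int
  | _, [], _ => none
  | pm?, x :: xs, suf =>
    let leftOk : Bool := match pm? with | none => true | some pm => decide (pm ≤ x)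
    let rightOk : Bool := match suf with | [] => true | m :: _ => decide (x ≤ m)
    if leftOk && rightOk then some x
    else bScan (some (match pm? with | none => x | some pm => if x > pm then x else pm)) xs suf.tail

def arrayLeftRight_alt (array : List Int) : Option Int :=
  bScan none array (sufMins array).tail

-- ===== PRECONDITION & SPEC =====
-- A raises on lists with fewer than two elements (IndexError or ValueError)
def Pre_arrayLeftRight (array : List Int) : Prop := 2 ≤ array.length
instance (array : List Int) : Decidable (Pre_arrayLeftRight array) := by unfold Pre_arrayLeftRight; infer_instance
def pvWitness_arrayLeftRight : List Int := [3, 1, 2, 5, 4]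

-- On single-element lists A raises ValueError (min of the empty slice array[1:]); B returns that element.
def Raises_arrayLeftRight (array : List Int) : Prop := array.length = 1
instance (array : List Int) : Decidable (Raises_arrayLeftRight array) := by unfold Raises_arrayLeftRight; infer_instance
def pvRaiseWitness_arrayLeftRight : List Int := [5]
def pvRaiseWitnessOut_arrayLeftRight : Option Int := some 5

def Spec_arrayLeftRight (array : List Int) (out : Option Int) : Prop := out = arrayLeftRight_alt array
instance (array : List Int) (out : Option Int) : Decidable (Spec_arrayLeftRight array out) := by unfold Spec_arrayLeftRight; infer_instance

-- ===== CLAIM (what is proved, stated in full; the proofs are below) =====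
def Claim_equal_arrayLeftRight : Prop := ∀ (array : List Int), Dom_arrayLeftRight array → Pre_arrayLeftRight array → Spec_arrayLeftRight array (arrayLeftRight array)
def Claim_raises_arrayLeftRight : Prop := (∀ (array : List Int), Dom_arrayLeftRight array → Raises_arrayLeftRight array → ¬ Pre_arrayLeftRight array) ∧ (Dom_arrayLeftRight (pvRaiseWitness_arrayLeftRight) ∧ Raises_arrayLeftRight (pvRaiseWitness_arrayLeftRight) ∧ arrayLeftRight_alt (pvRaiseWitness_arrayLeftRight) = pvRaiseWitnessOut_arrayLeftRight)

-- ===== LEMMAS AND PROOFS =====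

-- reference: first element that is ≥ everything before it and ≤ everything after it
def firstGood : List Int → List Int → Option Int
  | _, [] => none
  | pre, x :: xs =>
    if pre.all (fun y => decide (y ≤ x)) && xs.all (fun y => decide (x ≤ y)) then some x
    else firstGood (pre ++ [x]) xs

theorem sufMins_cons_ne_nil (x : Int) (xs : List Int) : sufMins (x :: xs) ≠ [] := by
  simp only [sufMins]
  split <;> simp

theorem sufMins_cons (x : Int) (xs : List Int) :
    sufMins (x :: xs) = match sufMins xs with
      | [] => [x]
      | m :: ms => (if m < x then m else x) :: m :: ms := rfl

theorem sufMins_tail (x : Int) (xs : List Int) : (sufMins (x :: xs)).tail = sufMins xs := by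
  cases xs with
  | nil => simp [sufMins]
  | cons y ys =>
    cases h : sufMins (y :: ys) with
    | nil => exact absurd h (sufMins_cons_ne_nil y ys)
    | cons m ms => rw [sufMins_cons, h]; rfl

theorem sufMins_head_min (ys : List Int) : ∀ (y : Int), ∃ m ms, sufMins (y :: ys) = m :: ms ∧
    ∀ x : Int, (x ≤ m ↔ ∀ z ∈ y :: ys, x ≤ z) := by
  induction ys with
  | nil => intro y; exact ⟨y, [], by simp [sufMins], by simp⟩
  | cons z zs ih =>
    intro y
    obtain ⟨m, ms, hm, hprop⟩ := ih z
    refine ⟨if m < y then m else y, m :: ms, by rw [sufMins_cons, hm], ?_⟩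
    intro x
    have h2 := hprop x
    constructor
    · intro hx w hw
      rcases List.mem_cons.mp hw with h | h
      · subst h; split at hx <;> omega
      · have hxm : x ≤ m := by split at hx <;> omega
        exact h2.mp hxm w h
    · intro hall
      have hy : x ≤ y := hall y (by simp)
      have hmle : x ≤ m := h2.mpr (fun w hw => hall w (by simp [hw]))
      split <;> omega

theorem bScan_cons (pm? : Option Int) (x : Int) (xs suf : List Int) :
    bScan pm? (x :: xs) suf =
      (if ((match pm? with | none => true | some pm => decide (pm ≤ x)) &&
           (match suf with | [] => true | m :: _ => decide (x ≤ m))) = true then some x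
       else bScan (some (match pm? with | none => x | some pm => if x > pm then x else pm)) xs suf.tail) := rfl

theorem bScan_eq (l : List Int) : ∀ (pm? : Option Int) (pre : List Int),
    (∀ x : Int, (match pm? with | none => true | some pm => decide (pm ≤ x)) = pre.all (fun y => decide (y ≤ x))) →
    bScan pm? l (sufMins l).tail = firstGood pre l := by
  induction l with
  | nil => intro pm? pre _; simp [bScan, firstGood]
  | cons x xs ih =>
    intro pm? pre H
    rw [sufMins_tail, bScan_cons]
    have hright : (match sufMins xs with | [] => true | m :: _ => decide (x ≤ m))
        = xs.all (fun y => decide (x ≤ y)) := by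
      cases xs with
      | nil => simp [sufMins]
      | cons z zs =>
        obtain ⟨m, ms, hm, hprop⟩ := sufMins_head_min zs z
        rw [hm, Bool.eq_iff_iff]
        simp only [decide_eq_true_eq, List.all_eq_true, decide_eq_true_eq]
        exact hprop x
    rw [H x, hright, firstGood]
    by_cases hc : (pre.all (fun y => decide (y ≤ x)) && xs.all (fun y => decide (x ≤ y))) = true
    · rw [if_pos hc, if_pos hc]
    · rw [if_neg hc, if_neg hc]
      apply ih
      intro z
      have Hz := H z
      simp only [List.all_append, List.all_cons, List.all_nil, Bool.and_true]
      cases pm? with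
      | none =>
        simp only at Hz
        simp [← Hz]
      | some pm =>
        simp only at Hz
        rw [← Hz]
        by_cases h1 : x > pm <;> by_cases h2 : pm ≤ z <;> by_cases h3 : x ≤ z <;>
          simp [h1, h2, h3] <;> omega

theorem alt_eq_firstGood (array : List Int) : arrayLeftRight_alt array = firstGood [] array := by
  apply bScan_eq
  intro x; simp

theorem max?_le_iff (l : List Int) (hl : l ≠ []) (x : Int) :
    ∃ M, PySem.List.max? l (fun y => y) = some M ∧ (M ≤ x ↔ ∀ y ∈ l, y ≤ x) := by
  cases h : PySem.List.max? l (fun y => y) with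
  | none => exact absurd ((PySem.List.max?_eq_none_iff l (fun y => y)).mp h) hl
  | some M =>
    refine ⟨M, rfl, ?_, ?_⟩
    · intro hMx y hy
      exact le_trans (PySem.List.max?_isMax h y hy) hMx
    · intro hall
      exact hall M (PySem.List.max?_mem h)

theorem min?_ge_iff (l : List Int) (hl : l ≠ []) (x : Int) :
    ∃ m, PySem.List.min? l (fun y => y) = some m ∧ (x ≤ m ↔ ∀ y ∈ l, x ≤ y) := by
  cases h : PySem.List.min? l (fun y => y) with
  | none => exact absurd ((PySem.List.min?_eq_none_iff l (fun y => y)).mp h) hl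
  | some m =>
    refine ⟨m, rfl, ?_, ?_⟩
    · intro hmx y hy
      exact le_trans hmx (PySem.List.min?_isMin h y hy)
    · intro hall
      exact hall m (PySem.List.min?_mem h)

theorem firstGood_cons (pre : List Int) (x : Int) (xs : List Int) :
    firstGood pre (x :: xs) =
      (if pre.all (fun y => decide (y ≤ x)) && xs.all (fun y => decide (x ≤ y)) then some x
       else firstGood (pre ++ [x]) xs) := rfl

theorem aLoop_cons (array : List Int) (i : Int) (is : List Int) :
    aLoop array (i :: is) =
      (match PySem.List.max? (PySem.List.slice array none (some i)) (fun y => y),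
             PySem.List.pyGet? array i,
             PySem.List.min? (PySem.List.slice array (some (i + 1)) none) (fun y => y) with
       | some M, some x, some m => if M ≤ x ∧ x ≤ m then some x else aLoop array is
       | _, _, _ => none) := rfl

theorem aLoop_eq (array : List Int) (hn : 2 ≤ array.length) :
    ∀ (j i : Nat), i + j = array.length - 1 → 1 ≤ i →
    (match aLoop array (PySem.List.pyRange (i : Int) ((array.length : Int) - 1) 1) with
     | some v => some v
     | none => aFinal array)
    = firstGood (array.take i) (array.drop i) := by
  intro j
  induction j with
  | zero =>
    intro i hij hi1
    have hi : i = array.length - 1 := by omega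
    subst hi
    have hcast : ((array.length - 1 : Nat) : Int) = (array.length : Int) - 1 := by omega
    rw [hcast, PySem.List.pyRange_one_eq_nil le_rfl]
    have hdrop : array.drop (array.length - 1) = [array[array.length - 1]] := by
      rw [List.drop_eq_getElem_cons (by omega)]
      have h' : array.length - 1 + 1 = array.length := by omega
      rw [h', List.drop_length]
    rw [hdrop, firstGood_cons]
    show aFinal array = _
    unfold aFinal
    rw [PySem.List.slice_to_neg_one, List.dropLast_eq_take]
    have hne : array.take (array.length - 1) ≠ [] := by
      intro h
      rcases List.take_eq_nil_iff.mp h with h' | h'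
      · omega
      · simp [h'] at hn
    obtain ⟨M, hM, hMiff⟩ := max?_le_iff _ hne array[array.length - 1]
    rw [hM, PySem.List.pyGet?_neg_one, List.getLast?_eq_getElem?,
        List.getElem?_eq_getElem (by omega)]
    show (if M ≤ array[array.length - 1] then some array[array.length - 1] else none) = _
    have hb : ((array.take (array.length - 1)).all (fun y => decide (y ≤ array[array.length - 1])) &&
        List.all [] (fun y => decide (array[array.length - 1] ≤ y))) = decide (M ≤ array[array.length - 1]) := by
      rw [Bool.eq_iff_iff]
      simp only [List.all_nil, Bool.and_true, List.all_eq_true, decide_eq_true_eq]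
      exact hMiff.symm
    by_cases hMx : M ≤ array[array.length - 1]
    · rw [if_pos hMx, if_pos (by rw [hb]; exact decide_eq_true hMx)]
    · rw [if_neg hMx, if_neg (by rw [hb]; simp [hMx])]
      rfl
  | succ j ihj =>
    intro i hij hi1
    have hilt : (i : Int) < (array.length : Int) - 1 := by omega
    rw [PySem.List.pyRange_one_cons hilt, aLoop_cons]
    have hslt : PySem.List.slice array none (some (i : Int)) = array.take i :=
      PySem.List.slice_to_natCast array i
    have hne1 : array.take i ≠ [] := by
      intro h
      rcases List.take_eq_nil_iff.mp h with h' | h'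
      · omega
      · simp [h'] at hn
    obtain ⟨M, hM, hMiff⟩ := max?_le_iff (array.take i) hne1 array[i]
    have hgx : PySem.List.pyGet? array (i : Int) = some array[i] := by
      rw [PySem.List.pyGet?_natCast, List.getElem?_eq_getElem (by omega)]
    have hcast1 : (i : Int) + 1 = ((i + 1 : Nat) : Int) := by omega
    have hslf : PySem.List.slice array (some ((i : Int) + 1)) none = array.drop (i + 1) := by
      rw [hcast1]; exact PySem.List.slice_from_natCast array (i + 1)
    have hne2 : array.drop (i + 1) ≠ [] := by
      simp only [ne_eq, List.drop_eq_nil_iff]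
      omega
    obtain ⟨m, hm, hmiff⟩ := min?_ge_iff (array.drop (i + 1)) hne2 array[i]
    rw [hslt, hM, hgx, hslf, hm]
    show (match (if M ≤ array[i] ∧ array[i] ≤ m then some array[i]
                 else aLoop array (PySem.List.pyRange ((i : Int) + 1) ((array.length : Int) - 1) 1)) with
          | some v => some v
          | none => aFinal array) = _
    have hdropc : array.drop i = array[i] :: array.drop (i + 1) :=
      List.drop_eq_getElem_cons (by omega)
    rw [hdropc, firstGood_cons]
    have hb : ((array.take i).all (fun y => decide (y ≤ array[i])) &&
        (array.drop (i + 1)).all (fun y => decide (array[i] ≤ y))) = decide (M ≤ array[i] ∧ array[i] ≤ m) := by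
      rw [Bool.eq_iff_iff]
      simp only [Bool.and_eq_true, List.all_eq_true, decide_eq_true_eq]
      exact (and_congr hMiff hmiff).symm
    by_cases hc : M ≤ array[i] ∧ array[i] ≤ m
    · rw [if_pos hc, if_pos (by rw [hb]; exact decide_eq_true hc)]
    · rw [if_neg hc, if_neg (by rw [hb]; simp [hc])]
      have htake : array.take i ++ [array[i]] = array.take (i + 1) := by
        rw [List.take_add_one, List.getElem?_eq_getElem (by omega)]
        rfl
      rw [htake, hcast1]
      exact ihj (i + 1) (by omega) (by omega)

theorem A_eq_firstGood (array : List Int) (hn : 2 ≤ array.length) :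
    arrayLeftRight array = firstGood [] array := by
  unfold arrayLeftRight
  have h0 : PySem.List.pyGet? array 0 = some array[0] := by
    rw [PySem.List.pyGet?_zero, List.getElem?_eq_getElem (by omega)]
  have h1 : PySem.List.slice array (some 1) none = array.drop 1 := by
    rw [PySem.List.slice_from_one, List.drop_one]
  have hne : array.drop 1 ≠ [] := by
    simp only [ne_eq, List.drop_eq_nil_iff]
    omega
  obtain ⟨m1, hm1, hm1iff⟩ := min?_ge_iff _ hne array[0]
  rw [h0, h1, hm1]
  show (if array[0] ≤ m1 then some array[0]
        else match aLoop array (PySem.List.pyRange 1 ((array.length : Int) - 1) 1) with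
             | some v => some v
             | none => aFinal array) = _
  have hcons : array.drop 0 = array[0] :: array.drop 1 := List.drop_eq_getElem_cons (by omega)
  rw [List.drop_zero] at hcons
  conv_rhs => rw [hcons]
  rw [firstGood_cons]
  have hb : (List.all [] (fun y => decide (y ≤ array[0])) &&
      (array.drop 1).all (fun y => decide (array[0] ≤ y))) = decide (array[0] ≤ m1) := by
    rw [Bool.eq_iff_iff]
    simp only [List.all_nil, Bool.true_and, List.all_eq_true, decide_eq_true_eq]
    exact hm1iff.symm
  by_cases hc : array[0] ≤ m1
  · rw [if_pos hc, if_pos (by rw [hb]; exact decide_eq_true hc)]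
  · rw [if_neg hc, if_neg (by rw [hb]; simp [hc])]
    have ht1 : array.take 1 = [array[0]] := by
      rcases array with _ | ⟨a, t⟩
      · simp at hn
      · simp
    rw [List.nil_append, ← ht1]
    have h := aLoop_eq array hn (array.length - 2) 1 (by omega) (by omega)
    simp only [Nat.cast_one] at h
    exact h

theorem arrayLeftRight_spec : Claim_equal_arrayLeftRight := by
  intro array _ hpre
  unfold Spec_arrayLeftRight
  rw [A_eq_firstGood array hpre, alt_eq_firstGood]

@[simp] theorem arrayLeftRight_raises : Claim_raises_arrayLeftRight := by
  unfold Claim_raises_arrayLeftRight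
  constructor
  · intro array _ hr hpre
    unfold Raises_arrayLeftRight at hr
    unfold Pre_arrayLeftRight at hpre
    omega
  · exact ⟨by decide, by decide, by decide⟩
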